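-- pv_equiv track=rewrite | github.com/SABIR-ILYASS/EulerProject | problem07.py | largeSum
-- ===== SOURCE A (Python) =====
-- import math
--
-- def isPrime(n):
--     if (n == 1):
--         return False
--     else:
--         f = True
--         for i in range(2,int(math.sqrt(n))+1):
--             if (n%i == 0):
--                 f = False
--                 break
--         return f
--
-- def sumPrime(n):
--     s = 0
--     a = 1
--     while(a<=n):
--         if (isPrime(a)):
--             s += a
--         a += 1
--     return s
--
-- def largeSum(n):
--     s=n
--     while(s>0):
--         a = sumPrime(s)
--
--         if (isPrime(s) and isPrime(a) and a<=n):
--             break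
--         s -= 1
--     return sumPrime(s)
-- ===== SOURCE B (Python) =====
-- def _is_prime(k):
--     if k < 2:
--         return False
--     if k % 2 == 0:
--         return k == 2
--     d = 3
--     while d * d <= k:
--         if k % d == 0:
--             return False
--         d += 2
--     return True
--
-- def largeSum(n):
--     if n < 2:
--         return 0
--     run = 0
--     pre = []
--     for k in range(n + 1):
--         if _is_prime(k):
--             run += k
--         pre.append(run)
--     for s in range(n, 1, -1):
--         if pre[s] - pre[s - 1] == s:
--             a = pre[s]
--             if a <= n and pre[a] - pre[a - 1] == a:
--                 return a
--     return 0
-- ===== Notes on version B (the rewrite author's own statement) =====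
-- stated objective: faster
-- what changed: Instead of recomputing sumPrime(s) from scratch for every candidate s, B builds one prefix-sum table of primes in a single forward pass and then scans downward reading primality and prime sums from the table in O(1) (primality itself tested by odd-only trial division).
import Mathlib
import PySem

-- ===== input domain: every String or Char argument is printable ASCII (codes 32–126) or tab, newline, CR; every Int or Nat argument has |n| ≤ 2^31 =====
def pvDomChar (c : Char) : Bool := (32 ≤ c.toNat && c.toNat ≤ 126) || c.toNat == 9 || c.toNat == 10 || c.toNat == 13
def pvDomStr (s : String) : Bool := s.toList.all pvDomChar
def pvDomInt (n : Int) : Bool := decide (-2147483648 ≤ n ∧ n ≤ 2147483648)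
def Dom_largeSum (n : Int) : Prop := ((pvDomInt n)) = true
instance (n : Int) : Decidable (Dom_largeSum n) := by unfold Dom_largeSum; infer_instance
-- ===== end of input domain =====

-- B replaces A's per-candidate recomputation of sumPrime by one prefix-sum table of primes built in
-- a single pass, then a downward scan with O(1) table lookups; objective: faster.

-- ===== PORT A =====

-- int(math.sqrt(n)) = Nat.sqrt on the domain (for 0 ≤ n ≤ 2^31 math.sqrt is exact enough);
-- in A's executions isPrime is only reached with n ≥ 1
def isPrime (n : Int) : Bool :=
  if n == 1 then false
  else (PySem.List.pyRange 2 ((n.toNat.sqrt : Int) + 1)).all (fun i => !(PySem.Int.mod n i == 0))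

-- the 'while a <= n' counting loop is the fold over range(1, n+1)
def sumPrime (n : Int) : Int :=
  (PySem.List.pyRange 1 (n + 1)).foldl (fun s a => if isPrime a then s + a else s) 0

def largeSumLoop (n s : Int) : Int :=
  if h : 0 < s then
    let a := sumPrime s
    if isPrime s && isPrime a && decide (a ≤ n) then s
    else largeSumLoop n (s - 1)
  else s
termination_by s.toNat
decreasing_by omega

def largeSum (n : Int) : Int := sumPrime (largeSumLoop n n)

-- ===== PORT B =====

def bTrial (k d : Int) : Bool :=
  if h : d * d ≤ k then
    if PySem.Int.mod k d == 0 then false else bTrial k (d + 2)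
  else true
termination_by (k + 2 - d).toNat
decreasing_by
  have hdk : d ≤ k := le_trans (by nlinarith [mul_self_nonneg (d - 1)]) h
  omega

def isPrimeB (k : Int) : Bool :=
  if k < 2 then false
  else if PySem.Int.mod k 2 == 0 then k == 2
  else bTrial k 3

def buildPre (n : Int) : Int × List Int :=
  (PySem.List.pyRange 0 (n + 1)).foldl
    (fun st k =>
      let run := if isPrimeB k then st.1 + k else st.1
      (run, st.2 ++ [run]))
    (0, [])

def scanB (n : Int) (pre : List Int) (s : Int) : Int :=
  if h : 1 < s then
    if PySem.List.pyGetD pre s 0 - PySem.List.pyGetD pre (s - 1) 0 == s then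
      let a := PySem.List.pyGetD pre s 0
      if decide (a ≤ n) && (PySem.List.pyGetD pre a 0 - PySem.List.pyGetD pre (a - 1) 0 == a) then a
      else scanB n pre (s - 1)
    else scanB n pre (s - 1)
  else 0
termination_by s.toNat
decreasing_by all_goals omega

def largeSum_alt (n : Int) : Int :=
  if n < 2 then 0 else scanB n (buildPre n).2 n

-- ===== PRECONDITION & SPEC =====
def Spec_largeSum (n : Int) (out : Int) : Prop := out = largeSum_alt n
instance (n : Int) (out : Int) : Decidable (Spec_largeSum n out) := by unfold Spec_largeSum; infer_instance

-- ===== CLAIM (what is proved, stated in full; the proofs are below) =====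
def Claim_equal_largeSum : Prop := ∀ (n : Int), Dom_largeSum n → Spec_largeSum n (largeSum n)

-- ===== LEMMAS AND PROOFS =====

-- sum of the primes ≤ m
def SPn : Nat → Nat
  | 0 => 0
  | m + 1 => SPn m + (if Nat.Prime (m + 1) then m + 1 else 0)

lemma isPrime_eq (m : Nat) (hm : 1 ≤ m) : isPrime (m : Int) = decide (Nat.Prime m) := by
  by_cases h1 : m = 1
  · subst h1; decide
  · have hm2 : 2 ≤ m := by omega
    have hne : ¬ ((m : Int) = 1) := by omega
    simp only [isPrime, Int.toNat_natCast, beq_iff_eq, hne, if_false]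
    rw [Bool.eq_iff_iff]
    simp only [List.all_eq_true, PySem.List.mem_pyRange_one, decide_eq_true_eq,
      Bool.not_eq_eq_eq_not, Bool.not_true, beq_eq_false_iff_ne, ne_eq]
    constructor
    · intro h
      refine Nat.prime_def_le_sqrt.mpr ⟨hm2, fun p hp2 hple hdvd => ?_⟩
      have := h (p : Int) ⟨by exact_mod_cast hp2, by omega⟩
      exact this ((PySem.Int.mod_eq_zero_iff_dvd _ _).mpr (by exact_mod_cast hdvd))
    · intro hp i hi hmod
      have hdvd : (i : Int) ∣ (m : Int) := (PySem.Int.mod_eq_zero_iff_dvd _ _).mp hmod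
      have hi0 : i = (i.toNat : Int) := by omega
      rw [hi0] at hdvd
      have : (i.toNat : Nat) ∣ m := by exact_mod_cast hdvd
      exact (Nat.prime_def_le_sqrt.mp hp).2 i.toNat (by omega) (by omega) this

lemma sumPrime_eq (m : Nat) : sumPrime (m : Int) = (SPn m : Int) := by
  induction m with
  | zero => simp [sumPrime, PySem.List.pyRange_one_eq_nil, SPn]
  | succ m ih =>
    unfold sumPrime
    rw [show ((m + 1 : Nat) : Int) + 1 = ((m:Int) + 1) + 1 by push_cast; ring,
      PySem.List.pyRange_one_succ_right (by omega), List.foldl_append]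
    rw [show (PySem.List.pyRange 1 ((m:Int) + 1)).foldl (fun s a => if isPrime a then s + a else s) 0 = sumPrime (m:Int) from rfl]
    rw [ih]
    rw [show ((m:Int) + 1) = ((m + 1 : Nat) : Int) by push_cast; ring]
    simp only [List.foldl]
    rw [isPrime_eq (m + 1) (by omega)]
    by_cases hp : Nat.Prime (m + 1)
    · simp [hp, SPn]
    · simp [hp, SPn]

lemma sumPrime_nonpos (n : Int) (hn : n ≤ 0) : sumPrime n = 0 := by
  unfold sumPrime
  rw [PySem.List.pyRange_one_eq_nil (by omega)]
  rfl

lemma SPn_ge_of_prime (m : Nat) (hp : Nat.Prime m) : m ≤ SPn m := by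
  match m with
  | 0 => omega
  | m + 1 => simp [SPn, hp]

lemma natCast_dvd (k : Int) (hk : 0 ≤ k) (m : Nat) (h : m ∣ k.toNat) : (m : Int) ∣ k := by
  have := Int.natCast_dvd_natCast.mpr h
  rwa [Int.toNat_of_nonneg hk] at this

lemma bTrial_eq (k d : Int) (hk : 3 ≤ k) (hkodd : ¬ (2:Int) ∣ k) (hd : 3 ≤ d) (hdodd : d % 2 = 1)
    (hinv : ∀ m : Nat, 2 ≤ m → (m : Int) < d → ¬ (m : Nat) ∣ k.toNat) :
    bTrial k d = decide (Nat.Prime k.toNat) := by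
  unfold bTrial
  by_cases h : d * d ≤ k
  · rw [dif_pos h]
    have hdk : d < k := by nlinarith
    by_cases hdvd : PySem.Int.mod k d = 0
    · have hdvd' : d ∣ k := (PySem.Int.mod_eq_zero_iff_dvd _ _).mp hdvd
      have hnp : ¬ Nat.Prime k.toNat := by
        intro hp
        have hdn : d.toNat ∣ k.toNat := by
          have : ((d.toNat : Int)) ∣ ((k.toNat : Int)) := by
            rwa [Int.toNat_of_nonneg (by omega), Int.toNat_of_nonneg (by omega)]
          exact_mod_cast this
        have := (Nat.prime_def_lt.mp hp).2 d.toNat (by omega) hdn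
        omega
      simp [hdvd, hnp]
    · rw [if_neg (by simpa using hdvd)]
      refine bTrial_eq k (d + 2) hk hkodd (by omega) (by omega) ?_
      intro m hm2 hmd hdvdm
      rcases lt_or_ge (m : Int) d with hlt | hge
      · exact hinv m hm2 hlt hdvdm
      · by_cases hmeq : (m : Int) = d
        · apply hdvd
          rw [PySem.Int.mod_eq_zero_iff_dvd, ← hmeq]
          exact natCast_dvd k (by omega) m hdvdm
        · have h2m : 2 ∣ m := by omega
          exact hkodd (natCast_dvd k (by omega) 2 (dvd_trans h2m hdvdm))
  · rw [dif_neg h]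
    have hp : Nat.Prime k.toNat := by
      by_contra hnp
      have h0 : 0 < k.toNat := by omega
      have hsq : k.toNat.minFac ^ 2 ≤ k.toNat := Nat.minFac_sq_le_self h0 hnp
      have hdvd : k.toNat.minFac ∣ k.toNat := Nat.minFac_dvd _
      have h2 : 2 ≤ k.toNat.minFac := (Nat.minFac_prime (by omega)).two_le
      rcases lt_or_ge ((k.toNat.minFac : Int)) d with hlt | hge
      · exact hinv _ h2 hlt hdvd
      · apply h
        have hsq' : k.toNat.minFac * k.toNat.minFac ≤ k.toNat := by nlinarith [hsq]
        have hc : (k.toNat.minFac : Int) * (k.toNat.minFac : Int) ≤ (k.toNat : Int) := by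
          exact_mod_cast hsq'
        calc d * d ≤ (k.toNat.minFac : Int) * (k.toNat.minFac : Int) := by nlinarith
          _ ≤ (k.toNat : Int) := hc
          _ = k := by omega
    simp [hp]
termination_by (k + 2 - d).toNat
decreasing_by
  omega

lemma isPrimeB_eq (m : Nat) : isPrimeB (m : Int) = decide (Nat.Prime m) := by
  unfold isPrimeB
  by_cases h2 : m < 2
  · interval_cases m <;> decide
  · rw [if_neg (by omega)]
    by_cases he : PySem.Int.mod (m : Int) 2 = 0
    · have : (2:Int) ∣ (m:Int) := (PySem.Int.mod_eq_zero_iff_dvd _ _).mp he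
      have h2m : 2 ∣ m := by exact_mod_cast this
      simp only [he]
      by_cases hm2 : m = 2
      · subst hm2; decide
      · have : ¬ Nat.Prime m := by
          intro hp
          have := (Nat.prime_def_lt.mp hp).2 2 (by omega) h2m
          omega
        simp_all
        omega
    · rw [if_neg (by simpa using he)]
      have hodd : ¬ (2:Int) ∣ (m:Int) := fun hd => he ((PySem.Int.mod_eq_zero_iff_dvd _ _).mpr hd)
      rw [bTrial_eq (m:Int) 3 (by omega) hodd (by omega) (by decide) ?_, Int.toNat_natCast]
      intro p hp2 hp3 hdvd
      have : p = 2 := by omega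
      subst this
      exact hodd (natCast_dvd _ (by omega) 2 hdvd)

lemma buildPre_eq (n : Nat) :
    buildPre (n : Int) = ((SPn n : Int), (List.range (n + 1)).map (fun k => (SPn k : Int))) := by
  induction n with
  | zero =>
    unfold buildPre
    rw [show ((0 : Nat) : Int) + 1 = 0 + 1 by norm_num, PySem.List.pyRange_one_succ_right (by omega),
      PySem.List.pyRange_one_eq_nil (by omega)]
    simp [SPn, isPrimeB]
  | succ n ih =>
    unfold buildPre
    rw [show ((n + 1 : Nat) : Int) + 1 = ((n : Int) + 1) + 1 by push_cast; ring,
      PySem.List.pyRange_one_succ_right (by omega), List.foldl_append]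
    rw [show (PySem.List.pyRange 0 ((n:Int) + 1)).foldl
          (fun st k => let run := if isPrimeB k then st.1 + k else st.1; (run, st.2 ++ [run]))
          ((0:Int), ([] : List Int)) = buildPre (n : Int) from rfl]
    rw [ih]
    simp only [List.foldl]
    rw [show ((n:Int) + 1) = ((n + 1 : Nat) : Int) by push_cast; ring, isPrimeB_eq (n + 1)]
    by_cases hp : Nat.Prime (n + 1)
    · simp [hp, SPn, List.range_succ]
    · simp [hp, SPn, List.range_succ]

lemma pre_get (n k : Nat) (hk : k ≤ n) :
    PySem.List.pyGetD ((List.range (n + 1)).map (fun j => (SPn j : Int))) (k : Int) 0 = (SPn k : Int) := by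
  rw [PySem.List.pyGetD_natCast, PySem.List.getD_map_range _ _ _ _ (by omega)]

lemma SPn_diff (u : Nat) (hu : 1 ≤ u) :
    (((SPn u : Int) - (SPn (u - 1) : Int) == (u : Int))) = decide (Nat.Prime u) := by
  match u with
  | v + 1 =>
    by_cases hp : Nat.Prime (v + 1)
    · simp [SPn, hp]
    · simp [SPn, hp]
      omega

lemma scan_eq (n : Int) (hn : 2 ≤ n) : ∀ s : Nat, (s : Int) ≤ n →
    scanB n ((List.range (n.toNat + 1)).map (fun j => (SPn j : Int))) (s : Int)
      = sumPrime (largeSumLoop n (s : Int)) := by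
  intro s
  induction s with
  | zero =>
    intro _
    rw [scanB, largeSumLoop]
    norm_num [sumPrime_nonpos 0 le_rfl]
  | succ s ih =>
    intro hs
    by_cases hs1 : s = 0
    · subst hs1
      rw [scanB, largeSumLoop]
      norm_num [show isPrime 1 = false from rfl]
      rw [largeSumLoop]
      norm_num [sumPrime_nonpos 0 le_rfl]
    · have hs2 : 1 ≤ s := by omega
      have htn : s + 1 ≤ n.toNat := by omega
      set pre := (List.range (n.toNat + 1)).map (fun j => (SPn j : Int)) with hpre
      have g1 : PySem.List.pyGetD pre ((s + 1 : Nat) : Int) 0 = (SPn (s + 1) : Int) := pre_get _ _ htn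
      have g2 : PySem.List.pyGetD pre (((s + 1 : Nat) : Int) - 1) 0 = (SPn s : Int) := by
        rw [show (((s + 1 : Nat) : Int) - 1) = ((s : Nat) : Int) by push_cast; ring]
        exact pre_get _ _ (by omega)
      rw [scanB, dif_pos (by push_cast; omega)]
      rw [largeSumLoop, dif_pos (by push_cast; omega)]
      simp only [g1, g2]
      rw [isPrime_eq (s + 1) (by omega), sumPrime_eq (s + 1)]
      have hd1 : (((SPn (s + 1) : Int) - (SPn s : Int)) == ((s + 1 : Nat) : Int)) = decide (Nat.Prime (s + 1)) := by
        simpa using SPn_diff (s + 1) (by omega)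
      rw [hd1]
      have hrec : ((s + 1 : Nat) : Int) - 1 = ((s : Nat) : Int) := by push_cast; ring
      by_cases hp : Nat.Prime (s + 1)
      · have hge := SPn_ge_of_prime (s + 1) hp
        have hq1 : 1 ≤ SPn (s + 1) := by omega
        rw [isPrime_eq (SPn (s + 1)) hq1]
        by_cases hle : (SPn (s + 1) : Int) ≤ n
        · have g3 : PySem.List.pyGetD pre ((SPn (s + 1) : Nat) : Int) 0 = (SPn (SPn (s + 1)) : Int) :=
            pre_get _ _ (by omega)
          have g4 : PySem.List.pyGetD pre (((SPn (s + 1) : Nat) : Int) - 1) 0 = (SPn (SPn (s + 1) - 1) : Int) := by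
            rw [show (((SPn (s + 1) : Nat) : Int) - 1) = ((SPn (s + 1) - 1 : Nat) : Int) by omega]
            exact pre_get _ _ (by omega)
          simp only [g3, g4]
          have hd2 := SPn_diff (SPn (s + 1)) hq1
          by_cases hq : Nat.Prime (SPn (s + 1))
          · simp [hp, hq, hle, hd2]
            rw [show (s : Int) + 1 = ((s + 1 : Nat) : Int) by push_cast; ring, sumPrime_eq]
          · simp only [hp, hq, hle, hd2, hrec, decide_true, decide_false,
              Bool.and_false, Bool.and_true]
            exact ih (by omega)
        · simp only [hp, hle, hrec, decide_true, decide_false, Bool.true_and, Bool.and_false,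
            Bool.false_and]
          exact ih (by omega)
      · simp only [hp, hrec, decide_false, Bool.false_and]
        exact ih (by omega)

-- ===== VERDICT (by name: the statement is the Claim_ definition above) =====
theorem largeSum_spec : Claim_equal_largeSum := by
  intro n _
  unfold Spec_largeSum largeSum largeSum_alt
  by_cases hn : n < 2
  · rw [if_pos hn]
    by_cases hn0 : 0 < n
    · have h1 : n = 1 := by omega
      subst h1
      rw [largeSumLoop]
      norm_num [show isPrime 1 = false from rfl]
      rw [largeSumLoop]
      norm_num [sumPrime_nonpos 0 (by omega)]
    · rw [largeSumLoop, dif_neg hn0]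
      exact sumPrime_nonpos n (by omega)
  · rw [if_neg hn]
    have h2 : 2 ≤ n := by omega
    have hcast : n = (n.toNat : Int) := by omega
    have hb : (buildPre n).2 = (List.range (n.toNat + 1)).map (fun j => (SPn j : Int)) := by
      rw [show buildPre n = buildPre ((n.toNat : Int)) by rw [← hcast], buildPre_eq]
    rw [hb, show largeSumLoop n n = largeSumLoop n ((n.toNat : Int)) by rw [← hcast],
      show scanB n ((List.range (n.toNat + 1)).map (fun j => (SPn j : Int))) n
         = scanB n ((List.range (n.toNat + 1)).map (fun j => (SPn j : Int))) ((n.toNat : Int)) by rw [← hcast]]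
    exact (scan_eq n h2 n.toNat (by omega)).symm
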